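-- pv_equiv track=rewrite | github.com/LonelyGuy12/fixflow | backend/code_indexer.py | rank_files_by_keyword_match
-- ===== SOURCE A (Python) =====
-- from typing import List, Dict, Optional
--
-- def rank_files_by_keyword_match(
--     files: List[Dict],
--     keywords: List[str],
-- ) -> List[Dict]:
--     """
--     Quick keyword-based pre-filter before sending the full list to the LLM.
--     Returns files sorted by keyword match count (descending).
--     """
--     scored = []
--     lc_keywords = [kw.lower() for kw in keywords]
--
--     for f in files:
--         path_lower = f["path"].lower()
--         score = sum(kw in path_lower for kw in lc_keywords)
--         scored.append((score, f))
--
--     scored.sort(key=lambda x: -x[0])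
--     return [f for _, f in scored]
-- ===== SOURCE B (Python) =====
-- from typing import List, Dict
--
--
-- def rank_files_by_keyword_match(
--     files: List[Dict],
--     keywords: List[str],
-- ) -> List[Dict]:
--     """Bucket (counting) sort by keyword match count, descending, stable."""
--     lc_keywords = [kw.lower() for kw in keywords]
--     n = len(lc_keywords)
--     buckets = [[] for _ in range(n + 1)]
--     for f in files:
--         path_lower = f["path"].lower()
--         s = sum(kw in path_lower for kw in lc_keywords)
--         buckets[s] = buckets[s] + [f]
--     result = []
--     for s in range(n, -1, -1):
--         result = result + buckets[s]
--     return result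
-- ===== Notes on version B (the rewrite author's own statement) =====
-- stated objective: alternative
-- what changed: Replaced the comparison sort on (-score, file) pairs by a counting/bucket sort: files are dropped into score buckets 0..len(keywords) in original order and the buckets are concatenated from the highest score down, preserving the stable descending order.
import Mathlib
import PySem

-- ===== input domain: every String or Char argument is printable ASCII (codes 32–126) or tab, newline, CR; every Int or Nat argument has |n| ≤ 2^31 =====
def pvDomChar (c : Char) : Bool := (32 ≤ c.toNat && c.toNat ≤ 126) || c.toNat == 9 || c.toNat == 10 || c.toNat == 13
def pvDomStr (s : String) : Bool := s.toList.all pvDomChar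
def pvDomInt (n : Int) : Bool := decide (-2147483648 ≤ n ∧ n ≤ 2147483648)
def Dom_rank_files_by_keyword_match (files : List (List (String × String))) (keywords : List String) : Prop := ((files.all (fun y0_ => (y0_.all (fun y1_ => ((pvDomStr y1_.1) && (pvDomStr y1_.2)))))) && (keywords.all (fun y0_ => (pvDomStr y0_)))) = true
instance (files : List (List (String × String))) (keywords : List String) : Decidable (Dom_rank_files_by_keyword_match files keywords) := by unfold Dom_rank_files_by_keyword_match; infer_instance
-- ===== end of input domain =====

-- B replaces A's comparison sort on (-score, file) pairs by a stable counting/bucket sort over scores 0..len(keywords) (alternative algorithm, same return value).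


-- shared helper: f["path"].lower() (total form; Pre_ guarantees the "path" key is present)
def pvPathLower (f : List (String × String)) : String :=
  PySem.Str.lower ((PySem.Dict.mk f).getD "path" "")
def pvScore (lc : List String) (pl : String) : Int :=
  (lc.map (fun kw => if PySem.Str.isIn kw pl then (1 : Int) else 0)).sum

-- ===== PORT A =====
def rank_files_by_keyword_match (files : List (List (String × String))) (keywords : List String) : List (List (String × String)) :=
  let lc_keywords := keywords.map PySem.Str.lower
  let scored := files.foldl (fun acc f => acc ++ [(pvScore lc_keywords (pvPathLower f), f)]) ([] : List (Int × List (String × String)))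
  let sorted := PySem.List.sorted scored (fun x => -x.1) false
  sorted.map (fun x => x.2)

-- ===== PORT B =====
def rank_files_by_keyword_match_alt (files : List (List (String × String))) (keywords : List String) : List (List (String × String)) :=
  let lc_keywords := keywords.map PySem.Str.lower
  let n := lc_keywords.length
  let buckets := files.foldl
    (fun bs f =>
      let s := (pvScore lc_keywords (pvPathLower f)).toNat
      bs.set s (bs.getD s [] ++ [f]))
    (List.replicate (n + 1) ([] : List (List (String × String))))
  (PySem.List.pyRange (n : Int) (-1) (-1)).foldl (fun acc s => acc ++ PySem.List.pyGetD buckets s []) []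

-- ===== PRECONDITION & SPEC =====
-- Pre_ excludes exactly the inputs containing a file without a "path" key, on which A raises KeyError.
def Pre_rank_files_by_keyword_match (files : List (List (String × String))) (keywords : List String) : Prop :=
  ∀ f ∈ files, ((PySem.Dict.mk f).contains "path") = true
instance (files : List (List (String × String))) (keywords : List String) : Decidable (Pre_rank_files_by_keyword_match files keywords) := by unfold Pre_rank_files_by_keyword_match; infer_instance

def pvWitness_rank_files_by_keyword_match : (List (List (String × String))) × List String :=
  ([[("path", "src/Main.py")], [("path", "README.md")]], ["main", "doc"])

def Spec_rank_files_by_keyword_match (files : List (List (String × String))) (keywords : List String) (out : List (List (String × String))) : Prop := out = rank_files_by_keyword_match_alt files keywords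
instance (files : List (List (String × String))) (keywords : List String) (out : List (List (String × String))) : Decidable (Spec_rank_files_by_keyword_match files keywords out) := by unfold Spec_rank_files_by_keyword_match; infer_instance

-- ===== CLAIM (what is proved, stated in full; the proofs are below) =====
def Claim_equal_rank_files_by_keyword_match : Prop := ∀ (files : List (List (String × String))) (keywords : List String), Dom_rank_files_by_keyword_match files keywords → Pre_rank_files_by_keyword_match files keywords → Spec_rank_files_by_keyword_match files keywords (rank_files_by_keyword_match files keywords)

-- ===== LEMMAS AND PROOFS =====
theorem insertBy_cons {α : Type} (before : α → α → Bool) (x y : α) (ys : List α) :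
    PySem.List.insertBy before x (y :: ys) = if before x y then x :: y :: ys else y :: PySem.List.insertBy before x ys := rfl
theorem insertBy_append_not_before {α : Type} (before : α → α → Bool) (x : α) (l1 l2 : List α)
    (h : ∀ y ∈ l1, before x y = false) :
    PySem.List.insertBy before x (l1 ++ l2) = l1 ++ PySem.List.insertBy before x l2 := by
  induction l1 with
  | nil => simp
  | cons y ys ih =>
    rw [List.cons_append, insertBy_cons, h y (by simp), if_neg (by simp)]
    rw [ih (fun z hz => h z (by simp [hz]))]
    rfl
theorem insertBy_all_before {α : Type} (before : α → α → Bool) (x : α) (l : List α)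
    (h : ∀ y ∈ l, before x y = true) :
    PySem.List.insertBy before x l = x :: l := by
  cases l with
  | nil => rfl
  | cons y ys => rw [insertBy_cons, h y (by simp), if_pos rfl]

theorem insert_flatMap {F : Type} (x : Int × F) (xs : List (Int × F)) (svals : List Int)
    (hdec : svals.Pairwise (fun a b => b < a)) (hx : x.1 ∈ svals) :
    PySem.List.insertBy (fun a b => decide ((-a.1 : Int) < -b.1)) x
      (svals.flatMap (fun s => xs.filter (fun p => p.1 == s)))
    = svals.flatMap (fun s => (xs ++ [x]).filter (fun p => p.1 == s)) := by
  induction svals with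
  | nil => simp at hx
  | cons s rest ih =>
    rw [List.pairwise_cons] at hdec
    obtain ⟨h1, h2⟩ := hdec
    have hmem : ∀ y ∈ rest.flatMap (fun s' => xs.filter (fun p => p.1 == s')), ∃ s' ∈ rest, y.1 = s' := by
      intro y hy
      rw [List.mem_flatMap] at hy
      obtain ⟨s', hs', hy⟩ := hy
      exact ⟨s', hs', by simpa using (List.of_mem_filter hy)⟩
    have hL1 : ∀ y ∈ xs.filter (fun p => p.1 == s), y.1 = s := by
      intro y hy; simpa using (List.of_mem_filter hy)
    by_cases hxs : x.1 = s
    · have hskip : ∀ y ∈ xs.filter (fun p => p.1 == s), (decide ((-x.1 : Int) < -y.1)) = false := by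
        intro y hy; rw [hL1 y hy, hxs]; simp
      rw [List.flatMap_cons, List.flatMap_cons,
        insertBy_append_not_before _ _ _ _ hskip,
        insertBy_all_before _ _ _ (by
          intro y hy
          obtain ⟨s', hs', hys⟩ := hmem y hy
          rw [hys, hxs]
          simpa using h1 s' hs')]
      have hrest : rest.flatMap (fun s' => (xs ++ [x]).filter (fun p => p.1 == s'))
          = rest.flatMap (fun s' => xs.filter (fun p => p.1 == s')) := by
        apply List.flatMap_congr
        intro s' hs'
        rw [List.filter_append]
        have hlt := h1 s' hs'
        have : (x.1 == s') = false := by rw [hxs]; simp; omega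
        simp [this]
      rw [hrest]
      have hhead : (xs ++ [x]).filter (fun p => p.1 == s) = xs.filter (fun p => p.1 == s) ++ [x] := by
        rw [List.filter_append]; simp [hxs]
      rw [hhead, List.append_assoc]
      rfl
    · have hxrest : x.1 ∈ rest := by
        rcases List.mem_cons.1 hx with h | h
        · exact absurd h hxs
        · exact h
      have hxlt : x.1 < s := h1 _ hxrest
      have hskip : ∀ y ∈ xs.filter (fun p => p.1 == s), (decide ((-x.1 : Int) < -y.1)) = false := by
        intro y hy; rw [hL1 y hy]; simp; omega
      rw [List.flatMap_cons, List.flatMap_cons,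
        insertBy_append_not_before _ _ _ _ hskip, ih h2 hxrest]
      have hhead : (xs ++ [x]).filter (fun p => p.1 == s) = xs.filter (fun p => p.1 == s) := by
        rw [List.filter_append]
        have : (x.1 == s) = false := by simpa using hxs
        simp [this]
      rw [hhead]

theorem sorted_eq_buckets {F : Type} (xs : List (Int × F)) (svals : List Int)
    (hdec : svals.Pairwise (fun a b => b < a)) (hx : ∀ p ∈ xs, p.1 ∈ svals) :
    PySem.List.sorted xs (fun x => -x.1) false
      = svals.flatMap (fun s => xs.filter (fun p => p.1 == s)) := by
  rw [PySem.List.sorted_eq_foldl_insertBy]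
  induction xs using List.reverseRecOn with
  | nil => simp
  | append_singleton ys y ih =>
    rw [List.foldl_append, List.foldl_cons, List.foldl_nil,
      ih (fun p hp => hx p (by simp [hp])),
      insert_flatMap y ys svals hdec (hx y (by simp))]

theorem pvScore_nonneg (lc : List String) (pl : String) : 0 ≤ pvScore lc pl := by
  unfold pvScore
  rw [PySem.List.sum_map_ite_one_zero]
  exact Int.natCast_nonneg _
theorem pvScore_le (lc : List String) (pl : String) : pvScore lc pl ≤ (lc.length : Int) := by
  unfold pvScore
  rw [PySem.List.sum_map_ite_one_zero]
  exact_mod_cast List.countP_le_length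

theorem getD_set (bs : List (List (List (String × String)))) (i s : Nat) (v : List (List (String × String))) :
    (bs.set i v).getD s [] = if i = s ∧ i < bs.length then v else bs.getD s [] := by
  simp [List.getD, List.getElem?_set]
  split_ifs
  all_goals simp_all
  all_goals omega

theorem bucket_fold_getD (lc : List String) (files : List (List (String × String)))
    (bs : List (List (List (String × String)))) (hlen : bs.length = lc.length + 1) :
    ∀ s : Nat, s ≤ lc.length →
      (files.foldl
        (fun bs f =>
          let s := (pvScore lc (pvPathLower f)).toNat
          bs.set s (bs.getD s [] ++ [f])) bs).getD s []
      = bs.getD s [] ++ files.filter (fun f => pvScore lc (pvPathLower f) == (s : Int)) := by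
  induction files generalizing bs with
  | nil => intro s hs; simp
  | cons f rest ih =>
    intro s hs
    rw [List.foldl_cons]
    have hsc0 := pvScore_nonneg lc (pvPathLower f)
    have hscn := pvScore_le lc (pvPathLower f)
    set t := (pvScore lc (pvPathLower f)).toNat with ht
    have htn : t ≤ lc.length := by omega
    have hlen' : (bs.set t (bs.getD t [] ++ [f])).length = lc.length + 1 := by
      rw [List.length_set]; exact hlen
    rw [ih _ hlen' s hs, getD_set]
    by_cases hts : t = s
    · have hfilter : (pvScore lc (pvPathLower f) == (s : Int)) = true := by
        simp only [beq_iff_eq]; omega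
      rw [List.filter_cons, hfilter]
      rw [if_pos ⟨hts, by omega⟩, hts]
      simp
    · have hfilter : (pvScore lc (pvPathLower f) == (s : Int)) = false := by
        simp only [beq_eq_false_iff_ne, ne_eq]; omega
      rw [List.filter_cons, hfilter]
      rw [if_neg (by tauto)]
      simp

theorem foldl_set_length (lc : List String) (files : List (List (String × String)))
    (bs : List (List (List (String × String)))) :
    (files.foldl
      (fun bs f =>
        let s := (pvScore lc (pvPathLower f)).toNat
        bs.set s (bs.getD s [] ++ [f])) bs).length = bs.length := by
  induction files generalizing bs with
  | nil => rfl
  | cons f rest ih => rw [List.foldl_cons, ih, List.length_set]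

theorem main_eq (files : List (List (String × String))) (keywords : List String) :
    rank_files_by_keyword_match files keywords = rank_files_by_keyword_match_alt files keywords := by
  unfold rank_files_by_keyword_match rank_files_by_keyword_match_alt
  dsimp only
  set lc := keywords.map PySem.Str.lower with hlc
  set n := lc.length with hn
  set svals := PySem.List.pyRange (n : Int) (-1) (-1) with hsvals
  have hdec : svals.Pairwise (fun a b => b < a) := by
    rw [hsvals, PySem.List.pyRange_neg_one_eq_reverse, List.pairwise_reverse]
    exact PySem.List.pairwise_lt_pyRange_one _ _
  have hmemsv : ∀ x : Int, 0 ≤ x → x ≤ (n : Int) → x ∈ svals := by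
    intro x h0 h1
    rw [hsvals, PySem.List.mem_pyRange_neg_one]
    omega
  -- A side
  rw [PySem.List.foldl_append_singleton_eq_map, List.nil_append]
  rw [sorted_eq_buckets _ svals hdec (by
    intro p hp
    rw [List.mem_map] at hp
    obtain ⟨f, hf, rfl⟩ := hp
    exact hmemsv _ (pvScore_nonneg _ _) (pvScore_le _ _))]
  -- B side
  rw [PySem.List.foldl_append_eq_flatMap, List.nil_append]
  rw [List.map_flatMap]
  apply List.flatMap_congr
  intro s hs
  rw [hsvals, PySem.List.mem_pyRange_neg_one] at hs
  have hlenb : (files.foldl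
      (fun bs f =>
        let t := (pvScore lc (pvPathLower f)).toNat
        bs.set t (bs.getD t [] ++ [f]))
      (List.replicate (n + 1) ([] : List (List (String × String))))).length = n + 1 := by
    rw [foldl_set_length, List.length_replicate]
  rw [PySem.List.pyGetD_eq_getElem _ _ (by omega) (by rw [hlenb]; omega)]
  rw [← List.getD_eq_getElem _ []]
  rw [bucket_fold_getD lc files _ (by rw [List.length_replicate]) s.toNat (by omega)]
  rw [List.getD_replicate, List.nil_append]
  rw [List.filter_map]
  have : (s.toNat : Int) = s := Int.toNat_of_nonneg (by omega)
  rw [this]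
  simp [Function.comp_def]
  omega

-- ===== VERDICT (by name: the statement is the Claim_ definition above) =====
theorem rank_files_by_keyword_match_spec : Claim_equal_rank_files_by_keyword_match := by
  intro files keywords _ _
  unfold Spec_rank_files_by_keyword_match
  exact main_eq files keywords
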